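-- pv_equiv track=rewrite | github.com/seul1230/DB-Deep | pipeline/sql_process.py | remove_json_line_comments
-- ===== SOURCE A (Python) =====
-- def remove_json_line_comments(json_str):
--     cleaned_lines = []
--     for line in json_str.splitlines():
--         if '//' in line:
--             quote_open = False
--             new_line = ''
--             i = 0
--             while i < len(line):
--                 if line[i] == '"':
--                     quote_open = not quote_open
--                     new_line += line[i]
--                     i += 1
--                 elif not quote_open and line[i:i+2] == '//':
--                     break
--                 else:
--                     new_line += line[i]
--                     i += 1
--             cleaned_lines.append(new_line.rstrip())
--         else:
--             cleaned_lines.append(line.rstrip())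
--     return '\n'.join(cleaned_lines)
-- ===== SOURCE B (Python) =====
-- def remove_json_line_comments(json_str):
--     cleaned = []
--     for line in json_str.splitlines():
--         parts = line.split('"')
--         kept = []
--         inside = False
--         for part in parts:
--             if not inside and '//' in part:
--                 kept.append(part[:part.index('//')])
--                 break
--             kept.append(part)
--             inside = not inside
--         cleaned.append('"'.join(kept).rstrip())
--     return '\n'.join(cleaned)
-- ===== Notes on version B (the rewrite author's own statement) =====
-- stated objective: alternative
-- what changed: A's per-character while loop with a quote_open state flag is replaced by splitting each line on '"' (even-indexed parts are outside quotes), cutting the first even part that contains '//' and dropping the rest, then rejoining with '"'.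
import Mathlib
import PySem

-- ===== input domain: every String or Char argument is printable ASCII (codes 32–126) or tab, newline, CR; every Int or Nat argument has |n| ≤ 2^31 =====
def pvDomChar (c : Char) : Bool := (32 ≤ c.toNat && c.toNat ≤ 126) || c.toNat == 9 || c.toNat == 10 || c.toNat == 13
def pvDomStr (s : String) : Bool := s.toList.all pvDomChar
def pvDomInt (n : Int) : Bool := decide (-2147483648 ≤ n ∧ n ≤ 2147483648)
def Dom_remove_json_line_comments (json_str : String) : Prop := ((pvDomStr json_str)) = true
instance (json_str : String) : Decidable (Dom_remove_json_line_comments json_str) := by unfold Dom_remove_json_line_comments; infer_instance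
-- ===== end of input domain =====

-- B replaces A's per-character quote-tracking scan by split-on-'"' tokenization (even parts are
-- outside quotes; the first even part containing '//' is cut and the line truncated): objective 'alternative'.

-- ===== PORT A =====
-- the inner while loop: state (quote_open, new_line), reading the suffix of the line from index i
def pvLoopA : List Char → Bool → List Char → List Char
  | [], _, new_line => new_line
  | c :: rest, quote_open, new_line =>
    if c = '"' then pvLoopA rest (!quote_open) (new_line ++ [c])
    else if !quote_open && ((c :: rest).take 2 == ['/', '/']) then new_line   -- line[i:i+2] == '//'
    else pvLoopA rest quote_open (new_line ++ [c])

def pvCleanLineA (line : List Char) : List Char :=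
  if PySem.Chars.isIn ['/', '/'] line then PySem.Chars.rstrip (pvLoopA line false [])
  else PySem.Chars.rstrip line

def remove_json_line_comments (json_str : String) : String :=
  String.mk (PySem.Chars.join ['\n']
    ((PySem.Chars.splitlines json_str.toList).foldl (fun acc line => acc ++ [pvCleanLineA line]) []))

-- ===== PORT B =====
-- part[:part.index('//')]
def pvCutPart (part : List Char) : List Char :=
  PySem.List.slice part none (some (PySem.Chars.find part ['/', '/']))

-- the inner for loop over parts with the 'inside' flag, 'kept' accumulator, break = stop recursing
def pvKeepParts : List (List Char) → Bool → List (List Char) → List (List Char)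
  | [], _, kept => kept
  | part :: rest, inside, kept =>
    if !inside && PySem.Chars.isIn ['/', '/'] part then kept ++ [pvCutPart part]
    else pvKeepParts rest (!inside) (kept ++ [part])

def pvCleanLineB (line : List Char) : List Char :=
  PySem.Chars.rstrip (PySem.Chars.join ['"'] (pvKeepParts (PySem.Chars.splitOn line ['"']) false []))

def remove_json_line_comments_alt (json_str : String) : String :=
  String.mk (PySem.Chars.join ['\n'] ((PySem.Chars.splitlines json_str.toList).map pvCleanLineB))

-- ===== PRECONDITION & SPEC =====
def Spec_remove_json_line_comments (json_str : String) (out : String) : Prop := out = remove_json_line_comments_alt json_str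
instance (json_str : String) (out : String) : Decidable (Spec_remove_json_line_comments json_str out) := by unfold Spec_remove_json_line_comments; infer_instance

-- ===== CLAIM (what is proved, stated in full; the proofs are below) =====
def Claim_equal_remove_json_line_comments : Prop := ∀ (json_str : String), Dom_remove_json_line_comments json_str → Spec_remove_json_line_comments json_str (remove_json_line_comments json_str)

-- ===== LEMMAS AND PROOFS =====

-- reference split-on-'"' (structural form of PySem.Chars.splitOn _ ['"'])
def pvSplit : List Char → List Char → List (List Char)
  | pre, [] => [pre]
  | pre, c :: rest => if c = '"' then pre :: pvSplit [] rest else pvSplit (pre ++ [c]) rest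

theorem pvSplit_ne_nil (l pre : List Char) : pvSplit pre l ≠ [] := by
  induction l generalizing pre with
  | nil => simp [pvSplit]
  | cons c rest ih => by_cases h : c = '"' <;> simp [pvSplit, h, ih]

theorem join_pvSplit (l pre : List Char) :
    PySem.Chars.join ['"'] (pvSplit pre l) = pre ++ l := by
  induction l generalizing pre with
  | nil => simp [pvSplit, PySem.Chars.join_singleton]
  | cons c rest ih =>
    by_cases hc : c = '"'
    · subst hc
      cases h : pvSplit ([] : List Char) rest with
      | nil => exact absurd h (pvSplit_ne_nil rest [])
      | cons b l' =>
        have hjoin := ih ([] : List Char)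
        rw [h] at hjoin
        rw [show pvSplit pre ('"' :: rest) = pre :: b :: l' from by simp [pvSplit, h]]
        rw [PySem.Chars.join_cons_cons, hjoin]
        simp
    · simpa [pvSplit, hc] using ih (pre ++ [c])

theorem noquote_pvSplit (l pre : List Char) (h : '"' ∉ pre) :
    ∀ p ∈ pvSplit pre l, '"' ∉ p := by
  induction l generalizing pre with
  | nil => simpa [pvSplit] using h
  | cons c rest ih =>
    by_cases hc : c = '"'
    · subst hc
      intro p hp
      rw [show pvSplit pre ('"' :: rest) = pre :: pvSplit [] rest from by simp [pvSplit]] at hp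
      rcases List.mem_cons.mp hp with rfl | hp
      · exact h
      · exact ih ([] : List Char) (by simp) p hp
    · intro p hp
      simp only [pvSplit, if_neg hc] at hp
      exact ih (pre ++ [c]) (by simp [h, Ne.symm hc]) p hp

theorem mem_pvSplit_infix (l pre p : List Char) (h : p ∈ pvSplit pre l) : p <:+: pre ++ l := by
  induction l generalizing pre with
  | nil =>
    simp only [pvSplit, List.mem_singleton] at h
    subst h; simp
  | cons c rest ih =>
    by_cases hc : c = '"'
    · subst hc
      rw [show pvSplit pre ('"' :: rest) = pre :: pvSplit [] rest from by simp [pvSplit]] at h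
      rcases List.mem_cons.mp h with rfl | h
      · exact (List.prefix_append p ('"' :: rest)).isInfix
      · have h2 := ih ([] : List Char) h
        simp only [List.nil_append] at h2
        refine h2.trans ⟨pre ++ ['"'], [], by simp⟩
    · simp only [pvSplit, if_neg hc] at h
      have h2 := ih (pre ++ [c]) h
      simpa using h2

theorem splitOn_go_spec (fuel : Nat) (l cur : List Char) (acc : List (List Char))
    (h : l.length ≤ fuel) :
    PySem.Chars.splitOn.go ['"'] fuel l cur acc = acc.reverse ++ pvSplit cur.reverse l := by
  induction fuel generalizing l cur acc with
  | zero =>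
    have hl : l = [] := List.length_eq_zero_iff.mp (Nat.le_zero.mp h)
    subst hl
    simp [PySem.Chars.splitOn.go, pvSplit]
  | succ n ih =>
    cases l with
    | nil => simp [PySem.Chars.splitOn.go, pvSplit]
    | cons c rest =>
      rw [PySem.Chars.splitOn.go]
      by_cases hc : c = '"'
      · subst hc
        rw [if_pos (by simp [List.isPrefixOf])]
        have hrec := ih rest ([] : List Char) (cur.reverse :: acc) (by simpa using Nat.le_of_succ_le_succ h)
        simp only [List.length_singleton, List.drop_succ_cons, List.drop_zero] at *
        rw [hrec]
        simp [pvSplit]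
      · rw [if_neg (by simp [List.isPrefixOf, Ne.symm hc])]
        have hrec := ih rest (c :: cur) acc (by simpa using Nat.le_of_succ_le_succ h)
        rw [hrec]
        simp [pvSplit, hc]

theorem splitOn_eq_pvSplit (l : List Char) : PySem.Chars.splitOn l ['"'] = pvSplit [] l := by
  unfold PySem.Chars.splitOn
  rw [splitOn_go_spec (l.length + 1) l [] [] (Nat.le_succ _)]
  simp

theorem pvLoopA_pass_true (p s acc : List Char) (hq : '"' ∉ p) :
    pvLoopA (p ++ s) true acc = pvLoopA s true (acc ++ p) := by
  induction p generalizing acc with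
  | nil => simp
  | cons c p' ih =>
    have hc : c ≠ '"' := fun h => hq (h ▸ List.mem_cons_self)
    simp only [List.cons_append, pvLoopA, if_neg hc, Bool.not_true, Bool.false_and,
      Bool.false_eq_true, if_false]
    rw [ih (acc ++ [c]) (fun h => hq (List.mem_cons_of_mem _ h))]
    simp

theorem pvLoopA_pass_false (p s acc : List Char) (hq : '"' ∉ p)
    (hns : ¬ ['/', '/'] <:+: p) (hs : s.head? ≠ some '/') :
    pvLoopA (p ++ s) false acc = pvLoopA s false (acc ++ p) := by
  induction p generalizing acc with
  | nil => simp
  | cons c p' ih =>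
    have hc : c ≠ '"' := fun h => hq (h ▸ List.mem_cons_self)
    have hcond : ((c :: (p' ++ s)).take 2 == ['/', '/']) = false := by
      rw [beq_eq_false_iff_ne]
      intro habs
      cases p' with
      | nil =>
        cases s with
        | nil => simp at habs
        | cons d t =>
          simp only [List.nil_append, List.take_succ_cons, List.take_succ_cons, List.take,
            List.cons.injEq] at habs
          exact hs (by simp [habs.2.1])
      | cons d t =>
        simp only [List.cons_append, List.take_succ_cons, List.take, List.cons.injEq] at habs
        obtain ⟨rfl, rfl, -⟩ := habs
        exact hns (List.IsPrefix.isInfix ⟨t, by simp⟩)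
    simp only [List.cons_append, pvLoopA, if_neg hc, Bool.not_false, Bool.true_and, hcond,
      Bool.false_eq_true, if_false]
    rw [ih (acc ++ [c]) (fun h => hq (List.mem_cons_of_mem _ h))
      (fun h => hns (List.infix_cons h))]
    simp

theorem pvLoopA_cut (p : List Char) (k : Nat) (s acc : List Char) (hq : '"' ∉ p)
    (h1 : ['/', '/'] <+: p.drop k) (h2 : ∀ i, i < k → ¬ ['/', '/'] <+: p.drop i) :
    pvLoopA (p ++ s) false acc = acc ++ p.take k := by
  induction p generalizing k acc with
  | nil =>
    rw [List.drop_nil] at h1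
    simpa using h1.length_le
  | cons c p' ih =>
    cases k with
    | zero =>
      simp only [List.drop_zero] at h1
      obtain ⟨t, ht⟩ := h1
      simp only [List.cons_append] at ht
      injection ht with hc ht'
      subst hc
      subst ht'
      simp [pvLoopA]
    | succ k =>
      have hc : c ≠ '"' := fun h => hq (h ▸ List.mem_cons_self)
      have hlen : k + 2 ≤ p'.length := by
        have := h1.length_le
        simp only [List.length_drop, List.length_cons] at this ⊢
        omega
      have hcond : ((c :: (p' ++ s)).take 2 == ['/', '/']) = false := by
        rw [beq_eq_false_iff_ne]
        intro habs
        cases p' with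
        | nil => simp at hlen
        | cons d t =>
          simp only [List.cons_append, List.take_succ_cons, List.take, List.cons.injEq] at habs
          obtain ⟨rfl, rfl, -⟩ := habs
          exact h2 0 (Nat.succ_pos _) (by simpa using List.IsPrefix.mk (l₁ := ['/', '/']) ⟨t, rfl⟩)
      simp only [List.cons_append, pvLoopA, if_neg hc, Bool.not_false, Bool.true_and, hcond,
        Bool.false_eq_true, if_false]
      rw [ih k (acc ++ [c]) (fun h => hq (List.mem_cons_of_mem _ h))
        (by simpa using h1)
        (fun i hi => by simpa using h2 (i + 1) (Nat.succ_lt_succ hi))]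
      simp [List.take_succ_cons]

theorem pvKeepParts_acc (parts : List (List Char)) (inside : Bool) (kept : List (List Char)) :
    pvKeepParts parts inside kept = kept ++ pvKeepParts parts inside [] := by
  induction parts generalizing inside kept with
  | nil => simp [pvKeepParts]
  | cons p rest ih =>
    simp only [pvKeepParts]
    split_ifs with h
    · simp
    · rw [ih (!inside) (kept ++ [p]), ih (!inside) ([] ++ [p])]
      simp

theorem pvKeepParts_ne_nil (parts : List (List Char)) (inside : Bool) (h : parts ≠ []) :
    pvKeepParts parts inside [] ≠ [] := by
  cases parts with
  | nil => exact absurd rfl h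
  | cons p rest =>
    simp only [pvKeepParts]
    split_ifs with hp
    · simp
    · rw [pvKeepParts_acc]
      simp

theorem pvKeepParts_all (parts : List (List Char)) (inside : Bool)
    (h : ∀ p ∈ parts, PySem.Chars.isIn ['/', '/'] p = false) :
    pvKeepParts parts inside [] = parts := by
  induction parts generalizing inside with
  | nil => simp [pvKeepParts]
  | cons p rest ih =>
    have hp := h p List.mem_cons_self
    simp only [pvKeepParts, hp, Bool.and_false, Bool.false_eq_true, if_false]
    rw [pvKeepParts_acc, ih (!inside) (fun q hq => h q (List.mem_cons_of_mem _ hq))]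
    simp

theorem pvCutPart_eq_take (p : List Char) (h : PySem.Chars.isIn ['/', '/'] p = true) :
    pvCutPart p = p.take (PySem.Chars.find p ['/', '/']).toNat := by
  unfold pvCutPart
  have h0 : 0 ≤ PySem.Chars.find p ['/', '/'] :=
    (PySem.Chars.find_nonneg_iff p ['/', '/']).mpr ((PySem.Chars.isIn_iff_infix _ _).mp h)
  exact PySem.List.slice_to p h0

theorem pvMain (parts : List (List Char)) (hq : ∀ p ∈ parts, '"' ∉ p) :
    ∀ (inside : Bool) (acc : List Char),
      pvLoopA (PySem.Chars.join ['"'] parts) inside acc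
        = acc ++ PySem.Chars.join ['"'] (pvKeepParts parts inside []) := by
  induction parts with
  | nil => intro inside acc; simp [PySem.Chars.join_nil, pvKeepParts, pvLoopA]
  | cons p rest ih =>
    intro inside acc
    have hqp : '"' ∉ p := hq p List.mem_cons_self
    have hqr : ∀ q ∈ rest, '"' ∉ q := fun q hq' => hq q (List.mem_cons_of_mem _ hq')
    cases rest with
    | nil =>
      rw [PySem.Chars.join_singleton]
      cases inside with
      | false =>
        by_cases hp : PySem.Chars.isIn ['/', '/'] p = true
        · have hfind := PySem.Chars.find_spec ((PySem.Chars.find_nonneg_iff p ['/', '/']).mpr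
            ((PySem.Chars.isIn_iff_infix _ _).mp hp))
          have := pvLoopA_cut p (PySem.Chars.find p ['/', '/']).toNat [] acc hqp hfind.1
            (fun i hi => hfind.2 i hi)
          simp only [List.append_nil] at this
          rw [this]
          simp [pvKeepParts, hp, PySem.Chars.join_singleton, pvCutPart_eq_take p hp]
        · have hns : ¬ ['/', '/'] <:+: p := (PySem.Chars.isIn_eq_false_iff _ _).mp
            (eq_false_of_ne_true hp)
          have := pvLoopA_pass_false p [] acc hqp hns (by simp)
          simp only [List.append_nil] at this
          rw [this]
          simp [pvLoopA, pvKeepParts, eq_false_of_ne_true hp, PySem.Chars.join_singleton]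
      | true =>
        have := pvLoopA_pass_true p [] acc hqp
        simp only [List.append_nil] at this
        rw [this]
        simp [pvLoopA, pvKeepParts, PySem.Chars.join_singleton]
    | cons r rs =>
      rw [PySem.Chars.join_cons_cons]
      cases inside with
      | false =>
        by_cases hp : PySem.Chars.isIn ['/', '/'] p = true
        · have hfind := PySem.Chars.find_spec ((PySem.Chars.find_nonneg_iff p ['/', '/']).mpr
            ((PySem.Chars.isIn_iff_infix _ _).mp hp))
          rw [List.append_assoc, pvLoopA_cut p (PySem.Chars.find p ['/', '/']).toNat _ acc hqp
            hfind.1 (fun i hi => hfind.2 i hi)]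
          simp [pvKeepParts, hp, PySem.Chars.join_singleton, pvCutPart_eq_take p hp]
        · have hns : ¬ ['/', '/'] <:+: p := (PySem.Chars.isIn_eq_false_iff _ _).mp
            (eq_false_of_ne_true hp)
          rw [List.append_assoc, pvLoopA_pass_false p _ acc hqp hns (by simp)]
          have hstep : pvLoopA (['"'] ++ PySem.Chars.join ['"'] (r :: rs)) false (acc ++ p)
              = pvLoopA (PySem.Chars.join ['"'] (r :: rs)) true (acc ++ p ++ ['"']) := by
            simp [pvLoopA]
          rw [hstep, ih hqr true (acc ++ p ++ ['"'])]
          have hne := pvKeepParts_ne_nil (r :: rs) true (by simp)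
          rw [show pvKeepParts (p :: r :: rs) false [] = pvKeepParts (r :: rs) true [p] from by
            rw [pvKeepParts]; simp [eq_false_of_ne_true hp]]
          rw [pvKeepParts_acc (r :: rs) true [p]]
          cases hkk : pvKeepParts (r :: rs) true [] with
          | nil => exact absurd hkk hne
          | cons b bs =>
            rw [show ([p] ++ b :: bs) = p :: b :: bs from rfl, PySem.Chars.join_cons_cons]
            simp
      | true =>
        rw [List.append_assoc, pvLoopA_pass_true p _ acc hqp]
        have hstep : pvLoopA (['"'] ++ PySem.Chars.join ['"'] (r :: rs)) true (acc ++ p)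
            = pvLoopA (PySem.Chars.join ['"'] (r :: rs)) false (acc ++ p ++ ['"']) := by
          simp [pvLoopA]
        rw [hstep, ih hqr false (acc ++ p ++ ['"'])]
        have hne := pvKeepParts_ne_nil (r :: rs) false (by simp)
        rw [show pvKeepParts (p :: r :: rs) true [] = pvKeepParts (r :: rs) false [p] from by
          rw [pvKeepParts]; simp]
        rw [pvKeepParts_acc (r :: rs) false [p]]
        cases hkk : pvKeepParts (r :: rs) false [] with
        | nil => exact absurd hkk hne
        | cons b bs =>
          rw [show ([p] ++ b :: bs) = p :: b :: bs from rfl, PySem.Chars.join_cons_cons]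
          simp

theorem pvCleanLine_eq (line : List Char) : pvCleanLineA line = pvCleanLineB line := by
  unfold pvCleanLineA pvCleanLineB
  rw [splitOn_eq_pvSplit]
  by_cases hin : PySem.Chars.isIn ['/', '/'] line = true
  · simp only [hin, if_true]
    congr 1
    have h := pvMain (pvSplit [] line) (noquote_pvSplit line [] (by simp)) false []
    rw [join_pvSplit] at h
    simpa using h
  · simp only [hin]
    refine congrArg PySem.Chars.rstrip ?_
    have hnone : ∀ p ∈ pvSplit [] line, PySem.Chars.isIn ['/', '/'] p = false := by
      intro p hp
      rw [PySem.Chars.isIn_eq_false_iff]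
      intro habs
      have hinf := mem_pvSplit_infix line [] p hp
      simp only [List.nil_append] at hinf
      exact (PySem.Chars.isIn_eq_false_iff _ _).mp (eq_false_of_ne_true hin) (habs.trans hinf)
    rw [pvKeepParts_all _ false hnone]
    simpa using (join_pvSplit line []).symm

-- ===== VERDICT (by name: the statement is the Claim_ definition above) =====
theorem remove_json_line_comments_spec : Claim_equal_remove_json_line_comments := by
  intro json_str _
  unfold Spec_remove_json_line_comments
  unfold remove_json_line_comments remove_json_line_comments_alt
  rw [PySem.List.foldl_append_singleton_eq_map]
  simp only [List.nil_append]
  congr 2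
  exact List.map_congr_left (fun l _ => pvCleanLine_eq l)
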